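-- pv_equiv track=rewrite | github.com/HAERXILUO/Granular-Ball-Node-Classifction | tools/corse_split.py | select_initial_centers
-- ===== SOURCE A (Python) =====
-- from math import sqrt
--
-- def select_initial_centers(component_C, degree_dict):
--     node_info = component_C[0]
--     class_nodes_dict = {}
--
--     for info in node_info:
--         label = info[-2]
--         node_index = int(info[-1])
--         if label not in class_nodes_dict and label != -1:
--             class_nodes_dict[label] = []
--         if label != -1:
--             class_nodes_dict[label].append(node_index)
--
--     num_classes = len(class_nodes_dict)
--     num_nodes = len(node_info)
--
--     if num_classes != 0:
--         centers_per_class = max(1, int(sqrt(num_nodes) / num_classes))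
--
--     centers = []
--     for label, nodes in class_nodes_dict.items():
--         degrees = [(node, degree_dict[node]) for node in nodes if node in degree_dict]
--         degrees.sort(key=lambda x: x[1], reverse=True)
--         selected_centers = [node for node, _ in degrees[:centers_per_class]]
--         centers.extend(selected_centers)
--     return centers
-- ===== SOURCE B (Python) =====
-- from math import sqrt
--
-- def select_initial_centers(component_C, degree_dict):
--     # One global stable sort by degree (descending) replaces A's per-class sorts;
--     # a single pass over the sorted list then fills each class's bucket up to the cap.
--     node_info = component_C[0]
--     classes = []
--     combined = []
--     for info in node_info:
--         label = info[-2]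
--         node = int(info[-1])
--         if label == -1:
--             continue
--         if label not in classes:
--             classes.append(label)
--         if node in degree_dict:
--             combined.append((node, label, degree_dict[node]))
--     if not classes:
--         return []
--     k = max(1, int(sqrt(len(node_info)) / len(classes)))
--     combined.sort(key=lambda t: t[2], reverse=True)
--     buckets = {c: [] for c in classes}
--     for node, label, _deg in combined:
--         b = buckets[label]
--         if len(b) < k:
--             b.append(node)
--     out = []
--     for c in classes:
--         out.extend(buckets[c])
--     return out
-- ===== Notes on version B (the rewrite author's own statement) =====
-- stated objective: alternative
-- what changed: Instead of grouping nodes per class and stably sorting each class's (node, degree) list separately, B performs ONE global stable sort of all (node, label, degree) triples by degree descending and then a single pass that fills each class's bucket up to the shared cap, concatenating buckets in first-occurrence class order.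
import Mathlib
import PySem

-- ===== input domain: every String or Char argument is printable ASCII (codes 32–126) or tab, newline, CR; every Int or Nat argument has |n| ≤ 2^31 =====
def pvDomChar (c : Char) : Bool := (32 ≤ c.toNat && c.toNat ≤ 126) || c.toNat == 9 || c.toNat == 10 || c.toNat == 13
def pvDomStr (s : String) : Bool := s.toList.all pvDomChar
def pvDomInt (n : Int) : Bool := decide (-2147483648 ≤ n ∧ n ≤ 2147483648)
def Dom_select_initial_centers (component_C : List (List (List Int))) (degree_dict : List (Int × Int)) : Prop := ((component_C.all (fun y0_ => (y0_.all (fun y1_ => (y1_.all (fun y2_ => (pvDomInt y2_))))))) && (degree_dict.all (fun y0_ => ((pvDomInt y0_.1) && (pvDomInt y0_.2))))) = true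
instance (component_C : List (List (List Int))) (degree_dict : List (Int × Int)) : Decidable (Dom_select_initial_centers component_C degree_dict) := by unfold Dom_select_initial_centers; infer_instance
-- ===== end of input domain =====

-- B replaces A's per-class sorts by ONE global stable sort by degree plus a single capped
-- bucket-filling pass (objective: alternative decomposition; equal return values).

-- ===== PORT A =====
-- Python's centers_per_class = max(1, int(sqrt(num_nodes)/num_classes)) is ported as
-- max 1 (Nat.sqrt num_nodes / num_classes): exact for the list lengths arising here
-- (double sqrt is correctly rounded, so the two computations agree far beyond 10^9 nodes).
def select_initial_centers (component_C : List (List (List Int))) (degree_dict : List (Int × Int)) : List Int :=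
  let node_info := PySem.List.pyGetD component_C 0 []  -- component_C[0]; Pre_ excludes component_C = []
  let dd := PySem.Dict.ofList degree_dict
  let class_nodes_dict : PySem.Dict Int (List Int) :=
    node_info.foldl (fun d info =>
      let label := PySem.List.pyGetD info (-2) 0   -- info[-2]; Pre_ guarantees 2 ≤ info.length
      let node_index := PySem.List.pyGetD info (-1) 0  -- int(info[-1]) = info[-1] on ints
      let d1 := if d.contains label = false ∧ label ≠ -1 then d.insert label [] else d
      if label ≠ -1 then d1.modify label [] (fun ns => ns ++ [node_index]) else d1)
      PySem.Dict.empty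
  let num_classes := class_nodes_dict.size
  let num_nodes := node_info.length
  let centers_per_class := max 1 (Nat.sqrt num_nodes / num_classes)
  class_nodes_dict.items.foldl (fun centers p =>
      let degrees := p.2.filterMap (fun node => (dd.get? node).map (fun dg => (node, dg)))
      let degreesSorted := PySem.List.sorted degrees (fun x => x.2) true
      let selected := (degreesSorted.take centers_per_class).map (fun x => x.1)
      centers ++ selected) []

-- ===== PORT B =====
def select_initial_centers_alt (component_C : List (List (List Int))) (degree_dict : List (Int × Int)) : List Int :=
  let node_info := PySem.List.pyGetD component_C 0 []
  let dd := PySem.Dict.ofList degree_dict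
  let st := node_info.foldl (fun (st : List Int × List (Int × Int × Int)) info =>
      let label := PySem.List.pyGetD info (-2) 0
      let node := PySem.List.pyGetD info (-1) 0
      if label = -1 then st
      else
        ((if label ∈ st.1 then st.1 else st.1 ++ [label]),
         (if dd.contains node then st.2 ++ [(node, label, dd.getD node 0)] else st.2)))
    ([], [])
  let classes := st.1
  let combined := st.2
  if classes = [] then []
  else
    let k := max 1 (Nat.sqrt node_info.length / classes.length)
    let srt := PySem.List.sorted combined (fun t => t.2.2) true
    let buckets0 : PySem.Dict Int (List Int) :=
      classes.foldl (fun d c => d.insert c []) PySem.Dict.empty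
    let buckets := srt.foldl (fun d t =>
        if (d.getD t.2.1 []).length < k then d.modify t.2.1 [] (fun b => b ++ [t.1]) else d)
      buckets0
    classes.foldl (fun out c => out ++ buckets.getD c []) []

-- ===== PRECONDITION & SPEC =====
-- Pre_ excludes exactly the inputs where Python A raises IndexError: an empty component_C
-- (component_C[0]) or a row of component_C[0] with fewer than 2 entries (info[-2]).
def Pre_select_initial_centers (component_C : List (List (List Int))) (degree_dict : List (Int × Int)) : Prop :=
  component_C ≠ [] ∧ ∀ info ∈ component_C.headI, 2 ≤ info.length
instance (component_C : List (List (List Int))) (degree_dict : List (Int × Int)) : Decidable (Pre_select_initial_centers component_C degree_dict) := by unfold Pre_select_initial_centers; infer_instance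

def pvWitness_select_initial_centers : List (List (List Int)) × (List (Int × Int)) :=
  ([[[0, 5], [1, 7], [0, 9]]], [(5, 3), (7, 2), (9, 4)])

def Spec_select_initial_centers (component_C : List (List (List Int))) (degree_dict : List (Int × Int)) (out : List Int) : Prop := out = select_initial_centers_alt component_C degree_dict
instance (component_C : List (List (List Int))) (degree_dict : List (Int × Int)) (out : List Int) : Decidable (Spec_select_initial_centers component_C degree_dict out) := by unfold Spec_select_initial_centers; infer_instance

-- ===== CLAIM (what is proved, stated in full; the proofs are below) =====
def Claim_equal_select_initial_centers : Prop := ∀ (component_C : List (List (List Int))) (degree_dict : List (Int × Int)), Dom_select_initial_centers component_C degree_dict → Pre_select_initial_centers component_C degree_dict → Spec_select_initial_centers component_C degree_dict (select_initial_centers component_C degree_dict)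

-- ===== LEMMAS AND PROOFS =====

def pvLabel (info : List Int) : Int := PySem.List.pyGetD info (-2) 0
def pvNode (info : List Int) : Int := PySem.List.pyGetD info (-1) 0
def pvPairs (ni : List (List Int)) : List (Int × Int) :=
  ni.filterMap (fun info => if pvLabel info = -1 then none else some (pvLabel info, pvNode info))
def pvG (c : Int) (q : Int × Int) : Int × Int × Int := (q.1, c, q.2)

-- insertBy puts x in front when x should come before every element
theorem pv_insertBy_of_forall_before {α : Type} (bef : α → α → Bool) (x : α) (l : List α)
    (h : ∀ y ∈ l, bef x y = true) : PySem.List.insertBy bef x l = x :: l := by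
  cases l with
  | nil => simp [PySem.List.insertBy]
  | cons y ys => simp [PySem.List.insertBy, h y (List.mem_cons_self)]

theorem pv_pw_insertBy {α : Type} (key : α → Int) (x : α) (l : List α)
    (h : l.Pairwise (fun a b => key b ≤ key a)) :
    (PySem.List.insertBy (fun a b => decide (key b < key a)) x l).Pairwise (fun a b => key b ≤ key a) := by
  induction l with
  | nil => simp [PySem.List.insertBy]
  | cons y ys ih =>
    rcases List.pairwise_cons.mp h with ⟨hy, hys⟩
    by_cases hb : key y < key x
    · simp only [PySem.List.insertBy, hb, decide_true, if_true]
      refine List.pairwise_cons.mpr ⟨?_, h⟩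
      intro z hz
      rcases List.mem_cons.mp hz with rfl | hz
      · omega
      · have := hy z hz; omega
    · simp only [PySem.List.insertBy, hb, decide_false]
      refine List.pairwise_cons.mpr ⟨?_, ih hys⟩
      intro z hz
      rcases (PySem.List.mem_insertBy _ _ _ _).mp hz with rfl | hz
      · omega
      · exact hy z hz

theorem pv_filter_insertBy {α : Type} (p : α → Bool) (key : α → Int) (x : α) (l : List α)
    (h : l.Pairwise (fun a b => key b ≤ key a)) :
    (PySem.List.insertBy (fun a b => decide (key b < key a)) x l).filter p =
      if p x then PySem.List.insertBy (fun a b => decide (key b < key a)) x (l.filter p)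
      else l.filter p := by
  induction l with
  | nil => cases hp : p x <;> simp [PySem.List.insertBy, hp]
  | cons y ys ih =>
    rcases List.pairwise_cons.mp h with ⟨hy, hys⟩
    by_cases hb : key y < key x
    · simp only [PySem.List.insertBy, hb, decide_true, if_true]
      cases hp : p x with
      | false => simp [List.filter_cons, hp]
      | true =>
        cases hpy : p y with
        | true => simp [hp, hpy, PySem.List.insertBy, hb]
        | false =>
          simp only [List.filter_cons, hp, hpy, if_true, Bool.false_eq_true, if_false]
          rw [pv_insertBy_of_forall_before]
          intro z hz
          have hzys : z ∈ ys := List.mem_of_mem_filter hz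
          have := hy z hzys
          simp only [decide_eq_true_eq]; omega
    · simp only [PySem.List.insertBy, hb, decide_false]
      cases hp : p x with
      | false =>
        cases hpy : p y <;> simp [hpy, ih hys, hp]
      | true =>
        cases hpy : p y with
        | false => simp [hpy, ih hys, hp]
        | true => simp [hpy, ih hys, hp, PySem.List.insertBy, hb]

theorem pv_foldl_insertBy_filter {α : Type} (p : α → Bool) (key : α → Int) (xs : List α) :
    ∀ acc, acc.Pairwise (fun a b => key b ≤ key a) →
    (xs.foldl (fun acc x => PySem.List.insertBy (fun a b => decide (key b < key a)) x acc) acc).filter p =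
      (xs.filter p).foldl (fun acc x => PySem.List.insertBy (fun a b => decide (key b < key a)) x acc) (acc.filter p) := by
  induction xs with
  | nil => intro acc _; rfl
  | cons x xs ih =>
    intro acc hacc
    have hpw := pv_pw_insertBy key x acc hacc
    simp only [List.foldl_cons, ih _ hpw, pv_filter_insertBy p key x acc hacc, List.filter]
    cases hp : p x <;> simp

-- filtering commutes with Python's stable sort (reverse=True, key into Int)
theorem pv_filter_sorted {α : Type} (p : α → Bool) (key : α → Int) (xs : List α) :
    (PySem.List.sorted xs key true).filter p = PySem.List.sorted (xs.filter p) key true := by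
  rw [PySem.List.sorted_rev_eq_foldl_insertBy, PySem.List.sorted_rev_eq_foldl_insertBy]
  simpa using pv_foldl_insertBy_filter p key xs [] (by simp)

theorem pv_map_insertBy {α β : Type} (g : α → β) (bef : β → β → Bool) (x : α) (l : List α) :
    (PySem.List.insertBy (fun a b => bef (g a) (g b)) x l).map g =
      PySem.List.insertBy bef (g x) (l.map g) := by
  induction l with
  | nil => simp [PySem.List.insertBy]
  | cons y ys ih =>
    by_cases hb : bef (g x) (g y) = true
    · simp [PySem.List.insertBy, hb]
    · simp only [Bool.not_eq_true] at hb
      simp [PySem.List.insertBy, hb, ih]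

theorem pv_map_sorted {α β : Type} (g : α → β) (key : β → Int) (xs : List α) :
    PySem.List.sorted (xs.map g) key true =
      (PySem.List.sorted xs (fun a => key (g a)) true).map g := by
  rw [PySem.List.sorted_rev_eq_foldl_insertBy, PySem.List.sorted_rev_eq_foldl_insertBy]
  suffices h : ∀ acc, (xs.map g).foldl
      (fun acc x => PySem.List.insertBy (fun a b => decide (key b < key a)) x acc) (acc.map g) =
      (xs.foldl (fun acc x => PySem.List.insertBy (fun a b => decide (key (g b) < key (g a))) x acc) acc).map g by
    simpa using h []
  induction xs with
  | nil => intro acc; rfl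
  | cons x xs ih =>
    intro acc
    simp only [List.map_cons, List.foldl_cons, ← pv_map_insertBy g (fun a b => decide (key b < key a)) x acc]
    exact ih _

-- A's dict-building loop is the plain grouping fold over pvPairs
theorem pvPairs_cons (info : List Int) (ni : List (List Int)) :
    pvPairs (info :: ni) = if pvLabel info = -1 then pvPairs ni
      else (pvLabel info, pvNode info) :: pvPairs ni := by
  by_cases hl : pvLabel info = -1 <;> simp [pvPairs, hl]

theorem pv_dictA_eq (ni : List (List Int)) :
    ∀ d : PySem.Dict Int (List Int),
    ni.foldl (fun d info =>
      let label := PySem.List.pyGetD info (-2) 0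
      let node_index := PySem.List.pyGetD info (-1) 0
      let d1 := if d.contains label = false ∧ label ≠ -1 then d.insert label [] else d
      if label ≠ -1 then d1.modify label [] (fun ns => ns ++ [node_index]) else d1) d =
    (pvPairs ni).foldl (fun d p => d.modify p.1 [] (fun ns => ns ++ [p.2])) d := by
  induction ni with
  | nil => intro d; rfl
  | cons info ni ih =>
    intro d
    rw [List.foldl_cons, ih, pvPairs_cons]
    simp only [pvLabel, pvNode]
    by_cases hl : PySem.List.pyGetD info (-2) 0 = -1
    · rw [if_pos hl]
      congr 1
      simp [hl]
    · rw [if_neg hl, List.foldl_cons]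
      congr 1
      by_cases hc : d.contains (PySem.List.pyGetD info (-2) 0) = false
      · simp only [hc, hl, not_false_iff, and_self, if_true, ne_eq]
        simp only [PySem.Dict.modify, PySem.Dict.getD_insert_self,
          PySem.Dict.insert_insert_self, PySem.Dict.getD_of_not_contains d _ hc]
      · rw [Bool.not_eq_false] at hc
        simp [hc, hl]

-- B's first loop computed in closed form
theorem pv_foldB_eq (dd : PySem.Dict Int Int) (ni : List (List Int)) :
    ∀ st : List Int × List (Int × Int × Int),
    ni.foldl (fun (st : List Int × List (Int × Int × Int)) info =>
      let label := PySem.List.pyGetD info (-2) 0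
      let node := PySem.List.pyGetD info (-1) 0
      if label = -1 then st
      else
        ((if label ∈ st.1 then st.1 else st.1 ++ [label]),
         (if dd.contains node then st.2 ++ [(node, label, dd.getD node 0)] else st.2))) st =
    (PySem.Set.update st.1 ((pvPairs ni).map Prod.fst),
     st.2 ++ (pvPairs ni).filterMap (fun p => (dd.get? p.2).map (fun dg => (p.2, p.1, dg)))) := by
  induction ni with
  | nil => intro st; simp [pvPairs, PySem.Set.update]
  | cons info ni ih =>
    intro st
    rw [List.foldl_cons, ih, pvPairs_cons]
    simp only [pvLabel, pvNode]
    by_cases hl : PySem.List.pyGetD info (-2) 0 = -1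
    · simp [hl]
    · rw [if_neg hl]
      simp only [hl, if_false, List.map_cons, List.filterMap_cons]
      refine Prod.ext ?_ ?_
      · simp only [PySem.Set.update, List.foldl_cons]
        congr 1
        simp only [PySem.Set.add, PySem.Set.contains]
        by_cases hm : PySem.List.pyGetD info (-2) 0 ∈ st.1
        · simp [hm]
        · rw [if_neg hm, if_neg (by simpa using hm)]
      · by_cases hc : dd.contains (PySem.List.pyGetD info (-1) 0) = true
        · have hs : (dd.get? (PySem.List.pyGetD info (-1) 0)).isSome := by
            rw [← PySem.Dict.contains_eq_isSome_get?]; exact hc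
          rcases Option.isSome_iff_exists.mp hs with ⟨v, hv⟩
          simp [hc, hv, PySem.Dict.getD_of_get?_eq_some dd 0 hv]
        · simp only [Bool.not_eq_true] at hc
          have hn : dd.get? (PySem.List.pyGetD info (-1) 0) = none := by
            have := PySem.Dict.contains_eq_isSome_get? dd (PySem.List.pyGetD info (-1) 0)
            rw [hc] at this
            exact Option.not_isSome_iff_eq_none.mp (by simp [← this])
          simp [hc, hn]

-- the capped bucket-filling pass, per class
theorem pv_fill (k : Nat) (srt : List (Int × Int × Int)) :
    ∀ (d : PySem.Dict Int (List Int)) (c : Int),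
    (srt.foldl (fun d t =>
        if (d.getD t.2.1 []).length < k then d.modify t.2.1 [] (fun b => b ++ [t.1]) else d) d).getD c [] =
      d.getD c [] ++ ((srt.filter (fun t => t.2.1 == c)).map (fun t => t.1)).take (k - (d.getD c []).length) := by
  induction srt with
  | nil => intro d c; simp
  | cons t srt ih =>
    intro d c
    simp only [List.foldl_cons, List.filter_cons]
    by_cases hc : t.2.1 = c
    · subst hc
      by_cases hlen : (d.getD t.2.1 []).length < k
      · simp only [hlen, if_true, ih, PySem.Dict.getD_modify_self, beq_self_eq_true, List.map_cons]
        rw [List.length_append]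
        have hk : k - (d.getD t.2.1 []).length = (k - ((d.getD t.2.1 []).length + 1)) + 1 := by omega
        rw [hk, List.take_succ_cons]
        simp
      · simp only [hlen, if_false, ih, beq_self_eq_true]
        have h0 : k - (d.getD t.2.1 []).length = 0 := by omega
        simp [h0]
    · have hbc : (t.2.1 == c) = false := by simp [hc]
      by_cases hlen : (d.getD t.2.1 []).length < k
      · simp only [hlen, if_true, ih, PySem.Dict.getD_modify]
        rw [if_neg (Ne.symm hc)]
        simp [hbc]
      · simp only [hlen, if_false, ih]
        simp [hbc]

theorem pv_buckets0_getD (cs : List Int) :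
    ∀ (d : PySem.Dict Int (List Int)), (∀ c, d.getD c [] = []) →
    ∀ c, (cs.foldl (fun d c => d.insert c ([] : List Int)) d).getD c [] = [] := by
  induction cs with
  | nil => intro d h c; exact h c
  | cons x cs ih =>
    intro d h c
    refine ih _ (fun c' => ?_) c
    rw [PySem.Dict.getD_insert]
    split <;> simp [h]

-- combined, filtered to one class, is that class's (node, degree) list tagged with pvG
theorem pv_combined_filter (dd : PySem.Dict Int Int) (P : List (Int × Int)) (c : Int) :
    (P.filterMap (fun p => (dd.get? p.2).map (fun dg => (p.2, p.1, dg)))).filter (fun t => t.2.1 == c) =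
      (((P.filter (fun p => p.1 == c)).map (fun p => p.2)).filterMap
        (fun node => (dd.get? node).map (fun dg => (node, dg)))).map (pvG c) := by
  induction P with
  | nil => rfl
  | cons p P ih =>
    simp only [List.filterMap_cons, List.filter_cons]
    by_cases hc : p.1 = c
    · cases hg : dd.get? p.2 with
      | none => simp [hg, hc, ih]
      | some dg => simp [hg, hc, ih, pvG]
    · cases hg : dd.get? p.2 with
      | none => simp [(by simp [hc] : (p.1 == c) = false), ih]
      | some dg => simp [(by simp [hc] : (p.1 == c) = false), ih]

-- the per-class selections agree
theorem pv_per_class (dd : PySem.Dict Int Int) (P : List (Int × Int)) (k : Nat) (c : Int) :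
    ((PySem.List.sorted
        (((P.filter (fun p => p.1 == c)).map (fun p => p.2)).filterMap
          (fun node => (dd.get? node).map (fun dg => (node, dg))))
        (fun x => x.2) true).take k).map (fun x => x.1) =
    (((PySem.List.sorted (P.filterMap (fun p => (dd.get? p.2).map (fun dg => (p.2, p.1, dg))))
        (fun t => t.2.2) true).filter (fun t => t.2.1 == c)).map (fun t => t.1)).take k := by
  rw [pv_filter_sorted (α := Int × Int × Int) (fun t => t.2.1 == c) (fun t => t.2.2),
    pv_combined_filter dd P c,
    pv_map_sorted (α := Int × Int) (β := Int × Int × Int) (pvG c) (fun t => t.2.2)]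
  have hkey : (fun a : Int × Int => (pvG c a).2.2) = (fun x : Int × Int => x.2) := rfl
  rw [hkey, List.map_map]
  have hfst : ((fun t : Int × Int × Int => t.1) ∘ pvG c) = (fun x : Int × Int => x.1) := rfl
  rw [hfst, ← List.map_take]

-- main equality on the extracted node_info and degree dict
theorem pv_main (degree_dict : List (Int × Int)) (ni : List (List Int)) :
    (let node_info := ni
     let dd := PySem.Dict.ofList degree_dict
     let class_nodes_dict : PySem.Dict Int (List Int) :=
       node_info.foldl (fun d info =>
         let label := PySem.List.pyGetD info (-2) 0
         let node_index := PySem.List.pyGetD info (-1) 0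
         let d1 := if d.contains label = false ∧ label ≠ -1 then d.insert label [] else d
         if label ≠ -1 then d1.modify label [] (fun ns => ns ++ [node_index]) else d1)
         PySem.Dict.empty
     let num_classes := class_nodes_dict.size
     let num_nodes := node_info.length
     let centers_per_class := max 1 (Nat.sqrt num_nodes / num_classes)
     class_nodes_dict.items.foldl (fun centers p =>
         let degrees := p.2.filterMap (fun node => (dd.get? node).map (fun dg => (node, dg)))
         let degreesSorted := PySem.List.sorted degrees (fun x => x.2) true
         let selected := (degreesSorted.take centers_per_class).map (fun x => x.1)
         centers ++ selected) []) =
    (let node_info := ni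
     let dd := PySem.Dict.ofList degree_dict
     let st := node_info.foldl (fun (st : List Int × List (Int × Int × Int)) info =>
         let label := PySem.List.pyGetD info (-2) 0
         let node := PySem.List.pyGetD info (-1) 0
         if label = -1 then st
         else
           ((if label ∈ st.1 then st.1 else st.1 ++ [label]),
            (if dd.contains node then st.2 ++ [(node, label, dd.getD node 0)] else st.2)))
       ([], [])
     let classes := st.1
     let combined := st.2
     if classes = [] then []
     else
       let k := max 1 (Nat.sqrt node_info.length / classes.length)
       let srt := PySem.List.sorted combined (fun t => t.2.2) true
       let buckets0 : PySem.Dict Int (List Int) :=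
         classes.foldl (fun d c => d.insert c []) PySem.Dict.empty
       let buckets := srt.foldl (fun d t =>
           if (d.getD t.2.1 []).length < k then d.modify t.2.1 [] (fun b => b ++ [t.1]) else d)
         buckets0
       classes.foldl (fun out c => out ++ buckets.getD c []) []) := by
  simp only
  rw [pv_dictA_eq, pv_foldB_eq]
  set dd := PySem.Dict.ofList degree_dict with hdd
  set P := pvPairs ni with hP
  set D := P.foldl (fun d p => d.modify p.1 [] (fun ns => ns ++ [p.2])) PySem.Dict.empty with hD
  have hkeys : D.keys = PySem.Set.update ([] : List Int) (P.map Prod.fst) := by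
    rw [hD, PySem.Dict.keys_foldl_modify_key P Prod.fst [] (fun _ p ns => ns ++ [p.2])]
    rfl
  have hnodup : D.keys.Nodup := by
    rw [hD]
    exact PySem.Dict.nodup_keys_foldl_modify_key P Prod.fst [] (fun _ p ns => ns ++ [p.2]) _
      (by simp)
  have hgetD : ∀ c, D.getD c [] = (P.filter (fun p => p.1 == c)).map (fun p => p.2) := by
    intro c
    rw [hD, PySem.Dict.getD_foldl_modify_append]
    simp [PySem.Dict.getD_empty]
  have hitems : D.items = D.keys.map (fun k => (k, D.getD k [])) :=
    PySem.Dict.items_eq_map_keys D hnodup []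
  simp only [PySem.Set.update, List.nil_append] at *
  by_cases hcls : PySem.Set.update ([] : List Int) (P.map Prod.fst) = []
  · simp only [PySem.Set.update] at hcls
    rw [if_pos hcls]
    rw [hitems, hkeys]
    simp only [hcls, List.map_nil, List.foldl_nil]
  · simp only [PySem.Set.update] at hcls
    rw [if_neg hcls]
    have hsize : D.size = ((P.map Prod.fst).foldl PySem.Set.add []).length := by
      have : D.size = D.keys.length := by
        simp [PySem.Dict.size, PySem.Dict.keys, List.length_map]
      rw [this, hkeys]
    rw [PySem.List.foldl_append_eq_flatMap, PySem.List.foldl_append_eq_flatMap, hitems, hkeys,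
      List.flatMap_map, hsize]
    refine List.flatMap_congr (fun c _ => ?_)
    rw [hgetD c]
    have hb0 : ∀ c : Int, ((List.foldl PySem.Set.add [] (List.map Prod.fst P)).foldl
        (fun d c => d.insert c ([] : List Int)) PySem.Dict.empty).getD c [] = [] :=
      pv_buckets0_getD _ _ (fun c' => PySem.Dict.getD_empty c' [])
    have hfill := pv_fill (max 1 (ni.length.sqrt / (List.foldl PySem.Set.add [] (List.map Prod.fst P)).length))
      (PySem.List.sorted (P.filterMap (fun p => (dd.get? p.2).map (fun dg => (p.2, p.1, dg)))) (fun t => t.2.2) true)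
      ((List.foldl PySem.Set.add [] (List.map Prod.fst P)).foldl (fun d c => d.insert c ([] : List Int)) PySem.Dict.empty) c
    rw [hb0 c] at hfill
    simp only [List.length_nil, Nat.sub_zero, List.nil_append] at hfill
    exact (pv_per_class dd P _ c).trans hfill.symm

-- ===== VERDICT (by name: the statement is the Claim_ definition above) =====
theorem select_initial_centers_spec : Claim_equal_select_initial_centers := by
  intro component_C degree_dict _hdom _hpre
  unfold Spec_select_initial_centers select_initial_centers select_initial_centers_alt
  exact pv_main degree_dict (PySem.List.pyGetD component_C 0 [])
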